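-- pv_equiv track=rewrite | github.com/alading-2/War3ExcelTool-Open | .history/src/core/get_string_color_20250401171203.py | format_with_color_codes
-- ===== SOURCE A (Python) =====
-- def format_with_color_codes(colors_data):
--     """
--     将颜色数据格式化为带有颜色代码的字符串
--
--     Args:
--         colors_data (list): 包含文本和颜色信息的列表，格式为[(text, color_rgb), ...]
--
--     Returns:
--         str: 格式化后的字符串，如 "aa|cffff0000bb|r|cff00ff00cc|rdd"
--     """
--     if not colors_data:
--         return ""
--
--     result = []
--     current_color = None
--     current_text = ""
--
--     for text, color in colors_data:
--         if color != current_color: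
--             # 如果有累积的文本，先添加到结果中
--             if current_text:
--                 if current_color:
--                     # 转换颜色格式：FFRRGGBB -> |cffRRGGBB|r
--                     if current_color.startswith("THEME"):
--                         # 主题颜色暂时使用默认颜色
--                         color_code = "|cffFFFFFF"
--                     else:
--                         # 确保RGB格式正确
--                         if current_color.startswith("FF") and len(current_color) == 8:
--                             color_code = f"|cff{current_color[2:]}"
--                         else:
--                             color_code = f"|cff{current_color}"
--                     result.append(f"{color_code}{current_text}|r")
--                 else:
--                     result.append(current_text)
--                 current_text = ""
--             current_color = color
--
--         current_text += text if text else ""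
--
--     # 处理最后一段文本
--     if current_text:
--         if current_color:
--             if current_color.startswith("THEME"):
--                 color_code = "|cffFFFFFF"
--             else:
--                 if current_color.startswith("FF") and len(current_color) == 8:
--                     color_code = f"|cff{current_color[2:]}"
--                 else:
--                     color_code = f"|cff{current_color}"
--             result.append(f"{color_code}{current_text}|r")
--         else:
--             result.append(current_text)
--
--     return "".join(result)
-- ===== SOURCE B (Python) =====
-- def _groups(colors_data):
--     """Group consecutive entries by color, concatenating their texts."""
--     groups = []
--     for text, color in colors_data:
--         if groups and groups[-1][0] == color:
--             groups[-1] = (color, groups[-1][1] + text)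
--         else:
--             groups.append((color, text))
--     return groups
--
--
-- def _color_code(color):
--     if color.startswith("THEME"):
--         return "|cffFFFFFF"
--     if color.startswith("FF") and len(color) == 8:
--         return "|cff" + color[2:]
--     return "|cff" + color
--
--
-- def format_with_color_codes(colors_data):
--     return "".join(
--         (_color_code(color) + text + "|r") if color else text
--         for color, text in _groups(colors_data)
--         if text
--     )
-- ===== Notes on version B (the rewrite author's own statement) =====
-- stated objective: simpler
-- what changed: Replaces A's single-pass flush state machine with its duplicated tail formatting block by a two-pass decomposition: first group consecutive same-color runs into (color, text) groups, then render each non-empty group once through a single _color_code helper.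
import Mathlib
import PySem

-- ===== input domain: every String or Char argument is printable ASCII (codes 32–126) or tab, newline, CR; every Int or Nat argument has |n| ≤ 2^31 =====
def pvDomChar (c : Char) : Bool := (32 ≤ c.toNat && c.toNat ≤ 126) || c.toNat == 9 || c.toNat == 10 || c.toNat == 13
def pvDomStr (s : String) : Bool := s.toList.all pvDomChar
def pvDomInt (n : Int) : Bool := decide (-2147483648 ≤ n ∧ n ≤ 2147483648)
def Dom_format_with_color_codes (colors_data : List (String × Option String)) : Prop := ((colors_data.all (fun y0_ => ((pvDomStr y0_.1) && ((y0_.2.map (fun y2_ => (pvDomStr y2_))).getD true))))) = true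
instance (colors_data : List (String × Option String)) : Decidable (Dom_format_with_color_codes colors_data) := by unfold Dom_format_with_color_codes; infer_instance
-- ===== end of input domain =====

-- B replaces A's single-pass flush state machine (with its duplicated tail block) by a
-- two-pass decomposition: group consecutive same-color runs, then render each group; objective: simpler.

-- ===== PORT A =====
-- A repeats the same flush block verbatim inside the loop and after it; the repeated block
-- is transcribed once here and cited at both sites, exactly as A computes it.
def pvFlushA (current_color : Option String) (current_text : String) : String :=
  match current_color with
  | some s =>
    if s ≠ "" then
      -- Python truthy 'if current_color:' with current_color a non-empty string
      let color_code :=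
        if PySem.Str.startswith s "THEME" then "|cffFFFFFF"
        else if PySem.Str.startswith s "FF" && PySem.Str.len s == 8 then
          "|cff" ++ PySem.Str.slice s (some 2) none
        else "|cff" ++ s
      color_code ++ current_text ++ "|r"
    else current_text
  | none => current_text

-- one iteration of A's for-loop over state (result, current_color, current_text)
def pvStepA (st : List String × Option String × String) (tc : String × Option String) :
    List String × Option String × String :=
  match st, tc with
  | (result, current_color, current_text), (text, color) =>
    if color ≠ current_color then
      let p := if current_text ≠ "" then (result ++ [pvFlushA current_color current_text], "")
               else (result, current_text)
      (p.1, color, p.2 ++ (if text ≠ "" then text else ""))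
    else
      (result, current_color, current_text ++ (if text ≠ "" then text else ""))

def format_with_color_codes (colors_data : List (String × Option String)) : String :=
  if colors_data.isEmpty then ""
  else
    let st := colors_data.foldl pvStepA ([], none, "")
    let result := if st.2.2 ≠ "" then st.1 ++ [pvFlushA st.2.1 st.2.2] else st.1
    PySem.Str.join "" result

-- ===== PORT B =====
-- Source B's _groups loop: extend the last group when its color matches, else start a new one
def pvStepB (groups : List (Option String × String)) (tc : String × Option String) :
    List (Option String × String) :=
  match groups.getLast? with
  | some g => if g.1 == tc.2 then groups.dropLast ++ [(tc.2, g.2 ++ tc.1)]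
              else groups ++ [(tc.2, tc.1)]
  | none => groups ++ [(tc.2, tc.1)]

def pvGroups (colors_data : List (String × Option String)) : List (Option String × String) :=
  colors_data.foldl pvStepB []

-- Source B's _color_code
def pvColorCode (color : String) : String :=
  if PySem.Str.startswith color "THEME" then "|cffFFFFFF"
  else if PySem.Str.startswith color "FF" && PySem.Str.len color == 8 then
    "|cff" ++ PySem.Str.slice color (some 2) none
  else "|cff" ++ color

-- the comprehension's per-group expression ('if color' truthiness: some non-empty string)
def pvSegB (color : Option String) (text : String) : String :=
  match color with
  | some s => if s ≠ "" then pvColorCode s ++ text ++ "|r" else text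
  | none => text

-- the comprehension: keep groups with non-empty text, render each
def pvRender (groups : List (Option String × String)) : List String :=
  groups.filterMap (fun g => if g.2 ≠ "" then some (pvSegB g.1 g.2) else none)

def format_with_color_codes_alt (colors_data : List (String × Option String)) : String :=
  PySem.Str.join "" (pvRender (pvGroups colors_data))

-- ===== PRECONDITION & SPEC =====
def Spec_format_with_color_codes (colors_data : List (String × Option String)) (out : String) : Prop := out = format_with_color_codes_alt colors_data
instance (colors_data : List (String × Option String)) (out : String) : Decidable (Spec_format_with_color_codes colors_data out) := by unfold Spec_format_with_color_codes; infer_instance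

-- ===== CLAIM (what is proved, stated in full; the proofs are below) =====
def Claim_equal_format_with_color_codes : Prop := ∀ (colors_data : List (String × Option String)), Dom_format_with_color_codes colors_data → Spec_format_with_color_codes colors_data (format_with_color_codes colors_data)

-- ===== LEMMAS AND PROOFS =====

-- A's repeated flush block computes exactly B's per-group rendering
lemma pvFlushA_eq (c : Option String) (t : String) : pvFlushA c t = pvSegB c t := by
  cases c <;> simp [pvFlushA, pvSegB, pvColorCode]

lemma pvRender_append (G : List (Option String × String)) (c : Option String) (t : String) :
    pvRender (G ++ [(c, t)]) = pvRender G ++ (if t ≠ "" then [pvSegB c t] else []) := by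
  by_cases h : t = "" <;> simp [pvRender, List.filterMap_append, h]

-- loop invariant: A's state after a prefix is (rendered earlier groups, last group's color, last group's text)
lemma pv_loop (l : List (String × Option String)) :
    ∀ (G₀ : List (Option String × String)) (c : Option String) (t : String),
    (let st := List.foldl pvStepA (pvRender G₀, c, t) l
     if st.2.2 ≠ "" then st.1 ++ [pvFlushA st.2.1 st.2.2] else st.1)
    = pvRender (List.foldl pvStepB (G₀ ++ [(c, t)]) l) := by
  induction l with
  | nil =>
    intro G₀ c t
    simp only [List.foldl_nil, pvRender_append, pvFlushA_eq]
    by_cases h : t = "" <;> simp [h]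
  | cons hd l ih =>
    intro G₀ c t
    obtain ⟨tx, cx⟩ := hd
    simp only [List.foldl_cons]
    by_cases hc : cx = c
    · have hA : pvStepA (pvRender G₀, c, t) (tx, cx) = (pvRender G₀, c, t ++ tx) := by
        simp [pvStepA, hc]
      have hB : pvStepB (G₀ ++ [(c, t)]) (tx, cx) = G₀ ++ [(c, t ++ tx)] := by
        simp [pvStepB, hc]
      rw [hA, hB]
      exact ih G₀ c (t ++ tx)
    · have hA : pvStepA (pvRender G₀, c, t) (tx, cx)
          = (pvRender (G₀ ++ [(c, t)]), cx, tx) := by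
        by_cases ht : t = "" <;>
          simp [pvStepA, hc, ht, pvRender_append, pvFlushA_eq]
      have hB : pvStepB (G₀ ++ [(c, t)]) (tx, cx) = (G₀ ++ [(c, t)]) ++ [(cx, tx)] := by
        have hc' : ¬c = cx := fun h => hc h.symm
        simp [pvStepB, hc']
      rw [hA, hB]
      exact ih (G₀ ++ [(c, t)]) cx tx

-- ===== VERDICT (by name: the statement is the Claim_ definition above) =====
theorem format_with_color_codes_spec : Claim_equal_format_with_color_codes := by
  intro colors_data _
  unfold Spec_format_with_color_codes
  cases colors_data with
  | nil => rfl
  | cons hd rest =>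
    obtain ⟨t0, c0⟩ := hd
    have hA0 : pvStepA ([], none, "") (t0, c0) = (pvRender [], c0, t0) := by
      cases c0 <;> simp [pvStepA, pvRender]
    have hB0 : pvStepB [] (t0, c0) = [] ++ [(c0, t0)] := by
      simp [pvStepB]
    simp only [format_with_color_codes, format_with_color_codes_alt, pvGroups,
      List.isEmpty_cons, List.foldl_cons, hA0, hB0]
    exact congrArg (PySem.Str.join "") (pv_loop rest [] c0 t0)
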